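-- pv_equiv track=rewrite | github.com/wickednull/KTOX_Pi | payloads/bluetooth/ble_beacon_flood.py | _encode_eddystone_url
-- ===== SOURCE A (Python) =====
-- EDDYSTONE_SCHEMES = {
--     "http://www.":  0x00,
--     "https://www.": 0x01,
--     "http://":      0x02,
--     "https://":     0x03,
-- }
--
-- EDDYSTONE_SUFFIXES = {
--     ".com/":  0x00, ".org/":  0x01, ".edu/": 0x02, ".net/": 0x03,
--     ".info/": 0x04, ".biz/":  0x05, ".gov/": 0x06,
--     ".com":   0x07, ".org":   0x08, ".edu":  0x09, ".net":  0x0A,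
--     ".info":  0x0B, ".biz":   0x0C, ".gov":  0x0D,
--     ".io":    0x0E, ".test":  0x0F,
-- }
--
-- def _encode_eddystone_url(url):
--     """Encode a URL into Eddystone-URL frame bytes (as hex strings)."""
--     scheme_byte = 0x02  # default http://
--     body = url
--     for prefix, code in sorted(EDDYSTONE_SCHEMES.items(), key=lambda x: -len(x[0])):
--         if url.startswith(prefix):
--             scheme_byte = code
--             body = url[len(prefix):]
--             break
--
--     encoded = []
--     i = 0
--     while i < len(body):
--         matched = False
--         for suffix, code in sorted(EDDYSTONE_SUFFIXES.items(), key=lambda x: -len(x[0])):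
--             if body[i:].startswith(suffix):
--                 encoded.append(f"{code:02X}")
--                 i += len(suffix)
--                 matched = True
--                 break
--         if not matched:
--             encoded.append(f"{ord(body[i]):02X}")
--             i += 1
--
--     return f"{scheme_byte:02X}", encoded
-- ===== SOURCE B (Python) =====
-- # Staged-rewrite implementation: strip the scheme, then run 16 whole-string
-- # str.replace passes (longest suffix first) that collapse each Eddystone suffix
-- # into a private-use sentinel character, and finally map every character of the
-- # rewritten body to its hex byte.  Correct because every suffix contains '.'
-- # only at its first position, so occurrences at distinct positions never
-- # overlap and longest-first replacement equals the greedy left-to-right scan.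
--
-- _SCHEME_PREFIXES = [
--     ("https://www.", 0x01),
--     ("http://www.",  0x00),
--     ("https://",     0x03),
--     ("http://",      0x02),
-- ]
--
-- _SENT = 0xE000  # private-use sentinel base; never occurs in ASCII input
--
-- _SUFFIX_PASSES = [
--     (".info/", 0x04),
--     (".com/",  0x00), (".org/", 0x01), (".edu/", 0x02), (".net/", 0x03),
--     (".biz/",  0x05), (".gov/", 0x06), (".info", 0x0B), (".test", 0x0F),
--     (".com",   0x07), (".org",  0x08), (".edu",  0x09), (".net",  0x0A),
--     (".biz",   0x0C), (".gov",  0x0D),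
--     (".io",    0x0E),
-- ]
--
--
-- def _encode_eddystone_url(url):
--     """Encode a URL into Eddystone-URL frame bytes (as hex strings)."""
--     scheme_byte, body = next(
--         ((code, url[len(prefix):])
--          for prefix, code in _SCHEME_PREFIXES if url.startswith(prefix)),
--         (0x02, url))
--     for suffix, code in _SUFFIX_PASSES:
--         body = body.replace(suffix, chr(_SENT + code))
--     return f"{scheme_byte:02X}", [
--         f"{ord(c) - _SENT:02X}" if ord(c) >= _SENT else f"{ord(c):02X}"
--         for c in body]
-- ===== Notes on version B (the rewrite author's own statement) =====
-- stated objective: faster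
-- what changed: A tokenizes the body with an index-advancing while loop that, at every position, re-sorts the suffix table and scans it with startswith on a fresh slice; B instead performs 16 staged whole-string str.replace passes (longest suffix first) that collapse each suffix into a sentinel character and then maps the rewritten body to hex in one comprehension - correct because every suffix contains '.' only at its first character, so occurrences never overlap and staged longest-first replacement equals the greedy scan.
import Mathlib
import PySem

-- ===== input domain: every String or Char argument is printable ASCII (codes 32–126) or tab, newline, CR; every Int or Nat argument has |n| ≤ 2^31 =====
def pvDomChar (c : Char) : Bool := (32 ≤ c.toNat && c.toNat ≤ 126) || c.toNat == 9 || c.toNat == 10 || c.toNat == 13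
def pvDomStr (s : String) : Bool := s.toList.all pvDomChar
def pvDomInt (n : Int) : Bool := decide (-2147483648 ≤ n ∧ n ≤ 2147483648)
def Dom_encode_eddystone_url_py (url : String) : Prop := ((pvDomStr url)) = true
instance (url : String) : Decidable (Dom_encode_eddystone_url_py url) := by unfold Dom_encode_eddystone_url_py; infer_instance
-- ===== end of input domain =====

-- B replaces A's per-position greedy scan (which re-sorts the suffix table at every index) by
-- 16 staged whole-string replace passes that collapse each suffix (longest first) into a
-- sentinel character, then one map from characters to hex bytes. Objective: faster (constant
-- factor, measured).

-- ===== PORT A =====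
-- shared helper: f"{n:02X}" for 0 ≤ n < 256 (both Pythons format with "%02X")
def pvHexDigit (n : Nat) : Char :=
  ['0','1','2','3','4','5','6','7','8','9','A','B','C','D','E','F'].getD n '0'
def pvHex2 (n : Nat) : String := String.ofList [pvHexDigit (n / 16), pvHexDigit (n % 16)]

-- EDDYSTONE_SCHEMES / EDDYSTONE_SUFFIXES in dict insertion order
def eddystoneSchemes : List (String × Nat) :=
  [("http://www.", 0x00), ("https://www.", 0x01), ("http://", 0x02), ("https://", 0x03)]
def eddystoneSuffixes : List (String × Nat) :=
  [(".com/", 0x00), (".org/", 0x01), (".edu/", 0x02), (".net/", 0x03),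
   (".info/", 0x04), (".biz/", 0x05), (".gov/", 0x06),
   (".com", 0x07), (".org", 0x08), (".edu", 0x09), (".net", 0x0A),
   (".info", 0x0B), (".biz", 0x0C), (".gov", 0x0D),
   (".io", 0x0E), (".test", 0x0F)]

-- sorted(….items(), key=lambda x: -len(x[0]))
def sortedSchemesA : List (String × Nat) :=
  PySem.List.sorted eddystoneSchemes (fun x => -(PySem.Str.len x.1))
def sortedSuffixesA : List (String × Nat) :=
  PySem.List.sorted eddystoneSuffixes (fun x => -(PySem.Str.len x.1))

-- A's scheme for-loop with break (body = url[len(prefix):] as toList.drop)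
def schemeLoopA (url : String) : List (String × Nat) → Nat × List Char
  | [] => (0x02, url.toList)
  | (pre, code) :: rest =>
    if PySem.Str.startswith url pre then (code, url.toList.drop pre.toList.length)
    else schemeLoopA url rest

-- A's inner for-loop with break: first (suffix, code) with body[i:].startswith(suffix)
def findSuffixA (l : List Char) : List (String × Nat) → Option (String × Nat)
  | [] => none
  | (suf, code) :: rest =>
    if PySem.Chars.startswith l suf.toList then some (suf, code) else findSuffixA l rest

-- termination helper for encodeBodyA (cited by its decreasing_by)
theorem findSuffixA_mem (l : List Char) (ps : List (String × Nat)) (p : String × Nat)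
    (h : findSuffixA l ps = some p) : p ∈ ps := by
  induction ps with
  | nil => simp [findSuffixA] at h
  | cons q rest ih =>
    rw [findSuffixA] at h
    split at h
    · simp_all
    · simp [ih h]

-- A's while loop over body, index i rendered as recursion on the remaining characters
def encodeBodyA (l : List Char) : List String :=
  match l with
  | [] => []
  | c :: rest =>
    match h : findSuffixA (c :: rest) sortedSuffixesA with
    | some (suf, code) => pvHex2 code :: encodeBodyA ((c :: rest).drop suf.toList.length)
    | none => pvHex2 c.toNat :: encodeBodyA rest
termination_by l.length
decreasing_by
  · have hm : (suf, code) ∈ eddystoneSuffixes := by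
      have := findSuffixA_mem _ _ _ h
      rwa [sortedSuffixesA, PySem.List.mem_sorted] at this
    have hpos : 1 ≤ suf.toList.length := by
      fin_cases hm <;> decide
    simp only [List.length_drop, List.length_cons]
    omega
  · simp

def encode_eddystone_url_py (url : String) : String × List String :=
  let sb := schemeLoopA url sortedSchemesA
  (pvHex2 sb.1, encodeBodyA sb.2)

-- ===== PORT B =====
-- Source B's _SCHEME_PREFIXES and next(...) first match with default (0x02, url)
def schemePrefixesB : List (String × Nat) :=
  [("https://www.", 0x01), ("http://www.", 0x00), ("https://", 0x03), ("http://", 0x02)]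
def firstSchemeB (url : String) : List (String × Nat) → Nat × List Char
  | [] => (0x02, url.toList)
  | (pre, code) :: rest =>
    if PySem.Str.startswith url pre then (code, url.toList.drop pre.toList.length)
    else firstSchemeB url rest

-- Source B's _SENT and _SUFFIX_PASSES (longest suffix first)
def sentBase : Nat := 0xE000
def suffixPassesB : List (String × Nat) :=
  [(".info/", 0x04),
   (".com/", 0x00), (".org/", 0x01), (".edu/", 0x02), (".net/", 0x03),
   (".biz/", 0x05), (".gov/", 0x06), (".info", 0x0B), (".test", 0x0F),
   (".com", 0x07), (".org", 0x08), (".edu", 0x09), (".net", 0x0A),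
   (".biz", 0x0C), (".gov", 0x0D),
   (".io", 0x0E)]

-- the 'for suffix, code in _SUFFIX_PASSES: body = body.replace(...)' loop
def runPassesB (l : List Char) : List Char :=
  suffixPassesB.foldl
    (fun b p => PySem.Chars.replace b p.1.toList [Char.ofNat (sentBase + p.2)]) l

-- the final list comprehension over the rewritten body
def decodeCharB (c : Char) : String :=
  if sentBase ≤ c.toNat then pvHex2 (c.toNat - sentBase) else pvHex2 c.toNat

def encode_eddystone_url_py_alt (url : String) : String × List String :=
  let sb := firstSchemeB url schemePrefixesB
  (pvHex2 sb.1, (runPassesB sb.2).map decodeCharB)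

-- ===== PRECONDITION & SPEC =====
def Spec_encode_eddystone_url_py (url : String) (out : String × List String) : Prop := out = encode_eddystone_url_py_alt url
instance (url : String) (out : String × List String) : Decidable (Spec_encode_eddystone_url_py url out) := by unfold Spec_encode_eddystone_url_py; infer_instance

-- ===== CLAIM (what is proved, stated in full; the proofs are below) =====
def Claim_equal_encode_eddystone_url_py : Prop := ∀ (url : String), Dom_encode_eddystone_url_py url → Spec_encode_eddystone_url_py url (encode_eddystone_url_py url)

-- ===== LEMMAS AND PROOFS =====

-- the two tables after A's sort, as literals
theorem sortedSuffixesA_eq : sortedSuffixesA = suffixPassesB := by decide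
theorem sortedSchemesA_eq : sortedSchemesA = schemePrefixesB := by decide

-- the two scheme searches are the same first-match recursion
theorem scheme_eq (url : String) (ps : List (String × Nat)) :
    schemeLoopA url ps = firstSchemeB url ps := by
  induction ps with
  | nil => rfl
  | cons p rest ih => rw [schemeLoopA, firstSchemeB]; split <;> simp [ih]

-- simple recursive form of Python's str.replace for a nonempty pattern
def replOne : List Char → Char → List Char → List Char
  | _, _, [] => []
  | o0 :: or, s, c :: t =>
    if (o0 :: or).isPrefixOf (c :: t) then
      s :: replOne (o0 :: or) s ((c :: t).drop (o0 :: or).length)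
    else c :: replOne (o0 :: or) s t
  | [], _, l => l
termination_by _ _ l => l.length
decreasing_by
  · simp only [List.drop, List.length_drop, List.length_cons]; omega
  · simp

theorem replace_go_eq (o : List Char) (s : Char) :
    ∀ fuel l acc, o ≠ [] → l.length ≤ fuel →
      PySem.Chars.replace.go o [s] fuel l acc = acc.reverse ++ replOne o s l := by
  intro fuel
  induction fuel with
  | zero =>
    intro l acc ho hl
    have : l = [] := by cases l <;> simp_all
    subst this
    cases o with
    | nil => exact absurd rfl ho
    | cons o0 or => simp [PySem.Chars.replace.go, replOne]
  | succ n ih =>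
    intro l acc ho hl
    cases l with
    | nil =>
      cases o with
      | nil => exact absurd rfl ho
      | cons o0 or => simp [PySem.Chars.replace.go, replOne]
    | cons c t =>
      cases o with
      | nil => exact absurd rfl ho
      | cons o0 or =>
        rw [PySem.Chars.replace.go, replOne]
        split
        · rename_i hp
          rw [ih _ _ ho (by simp at hl ⊢; omega)]
          simp
        · rw [ih _ _ ho (by simp at hl; omega)]
          simp

theorem replace_eq_replOne (l o : List Char) (s : Char) (ho : o ≠ []) :
    PySem.Chars.replace l o [s] = replOne o s l := by
  rw [PySem.Chars.replace]
  have : o.isEmpty = false := by cases o <;> simp_all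
  rw [this]
  simpa using replace_go_eq o s l.length l [] ho le_rfl

-- R: an s-free list that is a prefix of a replace result was already a prefix before
theorem prefix_of_replOne (o : List Char) (s : Char) (l : List Char) :
    ∀ a, s ∉ a → a <+: replOne o s l → a <+: l := by
  induction o, s, l using replOne.induct with
  | case1 o' s' => intro a _ h; simp only [replOne] at h; simpa using h
  | case2 o0 or s' c t hp ih =>
    intro a hs h
    rw [replOne, if_pos hp] at h
    cases a with
    | nil => exact List.nil_prefix
    | cons a0 a' =>
      rw [List.cons_prefix_cons] at h
      exact absurd h.1.symm (by simp at hs; exact hs.1)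
  | case3 o0 or s' c t hp ih =>
    intro a hs h
    rw [replOne, if_neg hp] at h
    cases a with
    | nil => exact List.nil_prefix
    | cons a0 a' =>
      rw [List.cons_prefix_cons] at h ⊢
      exact ⟨h.1, ih a' (fun hm => hs (List.mem_cons_of_mem _ hm)) h.2⟩
  | case4 s' l hl =>
    intro a _ h
    cases l with
    | nil => exact absurd rfl hl
    | cons c t => simpa only [replOne] using h

-- D: replace does not touch a block none of whose positions starts an occurrence
theorem replOne_append (o0 : Char) (o : List Char) (s : Char) :
    ∀ t x, (∀ j < t.length, ¬ ((o0 :: o) <+: (t ++ x).drop j)) →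
      replOne (o0 :: o) s (t ++ x) = t ++ replOne (o0 :: o) s x := by
  intro t
  induction t with
  | nil => intro x _; rfl
  | cons c t1 ih =>
    intro x h
    have h0 : ¬ ((o0 :: o) <+: (c :: (t1 ++ x))) := by
      have := h 0 (by simp)
      simpa using this
    have hne : ¬ (o0 :: o).isPrefixOf (c :: (t1 ++ x)) = true := by
      rw [List.isPrefixOf_iff_prefix]; exact h0
    show replOne (o0 :: o) s (c :: (t1 ++ x)) = c :: (t1 ++ replOne (o0 :: o) s x)
    rw [replOne, if_neg hne, ih x (fun j hj => by
      have := h (j + 1) (by simp; omega)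
      simpa using this)]

-- properties of every suffix entry in the table
def GoodPat (p : String × Nat) : Prop :=
  p.1.toList ≠ [] ∧ p.1.toList.head? = some '.' ∧
    (∀ c ∈ p.1.toList, c.toNat < 0xE000) ∧ (∀ c ∈ p.1.toList.tail, c ≠ '.')

-- turn a decidable Bool 'all' over a literal char list into the ∀-form
theorem ball_of_all {P : Char → Prop} [DecidablePred P] (l : List Char)
    (h : l.all (fun c => decide (P c)) = true) : ∀ c ∈ l, P c := by
  intro c hc
  have := List.all_eq_true.mp h c hc
  simpa using this

theorem goodPat_all : ∀ p ∈ suffixPassesB, GoodPat p := by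
  intro p hp
  simp only [suffixPassesB, List.mem_cons, List.not_mem_nil, or_false] at hp
  rcases hp with rfl|rfl|rfl|rfl|rfl|rfl|rfl|rfl|rfl|rfl|rfl|rfl|rfl|rfl|rfl|rfl <;>
    exact ⟨by decide, by decide, ball_of_all _ (by decide), ball_of_all _ (by decide)⟩

-- the fold of replOne passes (proof-side form of runPassesB)
def applyC (ps : List (String × Nat)) (l : List Char) : List Char :=
  ps.foldl (fun b p => replOne p.1.toList (Char.ofNat (sentBase + p.2)) b) l

-- for the codes actually used (0..15) the sentinel is a valid char with known toNat
theorem sent_toNat (p : String × Nat) (hp : p ∈ suffixPassesB) :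
    (Char.ofNat (sentBase + p.2)).toNat = sentBase + p.2 ∧ Char.ofNat (sentBase + p.2) ≠ '.' := by
  fin_cases hp <;> exact ⟨by decide, by decide⟩

-- G: a pass list none of whose patterns matches inside or at t leaves t alone
theorem applyC_append (ps : List (String × Nat)) (hg : ∀ p ∈ ps, p ∈ suffixPassesB) :
    ∀ t x, (∀ c ∈ t.tail, c ≠ '.') →
      (∀ p ∈ ps, ¬ (p.1.toList <+: t ++ x)) →
      applyC ps (t ++ x) = t ++ applyC ps x := by
  induction ps with
  | nil => intro t x _ _; rfl
  | cons p ps' ih =>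
    intro t x ht h
    have hgp : GoodPat p := goodPat_all p (hg p (by simp))
    obtain ⟨hne, hhead, hascii, _⟩ := hgp
    obtain ⟨o0, o, ho⟩ : ∃ o0 o, p.1.toList = o0 :: o := by
      cases hO : p.1.toList with
      | nil => exact absurd hO hne
      | cons a b => exact ⟨a, b, rfl⟩
    have ho0 : o0 = '.' := by rw [ho] at hhead; simpa using hhead
    have hstep : replOne p.1.toList (Char.ofNat (sentBase + p.2)) (t ++ x)
        = t ++ replOne p.1.toList (Char.ofNat (sentBase + p.2)) x := by
      rw [ho]
      apply replOne_append
      intro j hj hpre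
      cases j with
      | zero =>
        exact h p (by simp) (by rw [ho]; simpa using hpre)
      | succ j' =>
        -- the occurrence would start at t[j'+1] = '.', impossible
        have hget : (t ++ x).drop (j' + 1) = t.drop (j' + 1) ++ x := by
          rw [List.drop_append_of_le_length (by omega)]
        rw [hget] at hpre
        have htd : ∃ d ds, t.drop (j' + 1) = d :: ds := by
          cases hD : t.drop (j' + 1) with
          | nil => have := List.drop_eq_nil_iff.mp hD; omega
          | cons a b => exact ⟨a, b, rfl⟩
        obtain ⟨d, ds, hD⟩ := htd
        have hdmem : d ∈ t.tail := by
          have : d ∈ t.drop (j' + 1) := by rw [hD]; simp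
          have h1 : t.drop (j' + 1) = t.tail.drop j' := by
            cases t <;> simp_all
          rw [h1] at this
          exact List.mem_of_mem_drop this
        have := ht d hdmem
        rw [hD] at hpre
        rw [List.cons_append, List.cons_prefix_cons] at hpre
        exact this (hpre.1.symm.trans ho0)
    show applyC ps' (replOne p.1.toList _ (t ++ x)) = t ++ applyC ps' (replOne p.1.toList _ x)
    rw [hstep]
    apply ih (fun q hq => hg q (by simp [hq])) t _ ht
    intro q hq hqpre
    -- q is s-free; pull the prefix back through the pass and contradict h
    rw [← hstep] at hqpre
    have hsq : Char.ofNat (sentBase + p.2) ∉ q.1.toList := by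
      intro hm
      obtain ⟨hqne, _, hqascii, _⟩ := goodPat_all q (hg q (by simp [hq]))
      have h1 := hqascii _ hm
      have h2 := (sent_toNat p (hg p (by simp))).1
      rw [h2] at h1
      simp [sentBase] at h1
    have := prefix_of_replOne p.1.toList (Char.ofNat (sentBase + p.2)) (t ++ x) q.1.toList hsq hqpre
    exact h q (by simp [hq]) this

-- characterisation of A's first-match search
theorem findSuffixA_none (l : List Char) (ps : List (String × Nat))
    (h : findSuffixA l ps = none) : ∀ p ∈ ps, ¬ (p.1.toList <+: l) := by
  induction ps with
  | nil => simp
  | cons q rest ih =>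
    rw [findSuffixA] at h
    split at h
    · exact absurd h (by simp)
    · intro p hp
      rcases List.mem_cons.mp hp with rfl | hp'
      · rename_i hq
        rw [PySem.Chars.startswith_iff] at hq; exact fun hc => hq (by simpa using hc)
      · exact ih h p hp'

theorem findSuffixA_some (l : List Char) (ps : List (String × Nat)) (pc : String × Nat)
    (h : findSuffixA l ps = some pc) :
    ∃ pre post, ps = pre ++ pc :: post ∧ pc.1.toList <+: l ∧
      ∀ p ∈ pre, ¬ (p.1.toList <+: l) := by
  induction ps with
  | nil => simp [findSuffixA] at h
  | cons q rest ih =>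
    rw [findSuffixA] at h
    split at h
    · rename_i hq
      obtain rfl : q = pc := by simpa using h
      exact ⟨[], rest, by simp, by rwa [PySem.Chars.startswith_iff] at hq, by simp⟩
    · rename_i hq
      obtain ⟨pre, post, h1, h2, h3⟩ := ih h
      refine ⟨q :: pre, post, by simp [h1], h2, ?_⟩
      intro p hp
      rcases List.mem_cons.mp hp with rfl | hp'
      · rw [PySem.Chars.startswith_iff] at hq; exact fun hc => hq (by simpa using hc)
      · exact h3 p hp'

-- the tokenisation of A rendered as characters: suffix ↦ sentinel, other char ↦ itself
def chtok (l : List Char) : List Char :=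
  match l with
  | [] => []
  | c :: rest =>
    match h : findSuffixA (c :: rest) sortedSuffixesA with
    | some (suf, code) => Char.ofNat (sentBase + code) :: chtok ((c :: rest).drop suf.toList.length)
    | none => c :: chtok rest
termination_by l.length
decreasing_by
  · have hm : (suf, code) ∈ eddystoneSuffixes := by
      have := findSuffixA_mem _ _ _ h
      rwa [sortedSuffixesA, PySem.List.mem_sorted] at this
    have hpos : 1 ≤ suf.toList.length := by
      fin_cases hm <;> decide
    simp only [List.length_drop, List.length_cons]
    omega
  · simp

theorem applyC_nil (ps : List (String × Nat)) : applyC ps [] = [] := by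
  induction ps with
  | nil => rfl
  | cons p rest ih =>
    show applyC rest (replOne p.1.toList _ []) = []
    cases hO : p.1.toList with
    | nil => rw [replOne]; exact ih
    | cons a b => rw [replOne]; exact ih

-- the crux: 16 staged replace passes compute exactly A's greedy tokenisation
theorem applyC_eq_chtok (l : List Char) : applyC suffixPassesB l = chtok l := by
  induction l using chtok.induct with
  | case1 => rw [chtok]; exact applyC_nil _
  | case2 c rest suf code h ih =>
    obtain ⟨pre, post, hsplit, hpref, hnone⟩ := findSuffixA_some _ _ _ h
    rw [sortedSuffixesA_eq] at hsplit
    obtain ⟨y, hy⟩ := hpref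
    have hgood : GoodPat (suf, code) := goodPat_all _ (by rw [hsplit]; simp)
    obtain ⟨hne, hhead, _, htail⟩ := hgood
    -- decompose the fold along the split
    have hfold : ∀ z, applyC suffixPassesB z
        = applyC post (replOne suf.toList (Char.ofNat (sentBase + code)) (applyC pre z)) := by
      intro z
      rw [hsplit]
      simp [applyC, List.foldl_append]
    have hdrop : (c :: rest).drop suf.toList.length = y := by
      rw [← hy]; simp
    have hred : chtok (c :: rest) = Char.ofNat (sentBase + code) :: chtok y := by
      rw [chtok, h]
      dsimp only
      rw [hdrop]
    rw [hred, hfold]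
    have hmempre : ∀ p ∈ pre, p ∈ suffixPassesB := by
      intro p hp; rw [hsplit]; simp [hp]
    have hmempost : ∀ p ∈ post, p ∈ suffixPassesB := by
      intro p hp; rw [hsplit]; simp [hp]
    -- pre passes leave the leading token alone
    have h1 : applyC pre (c :: rest) = suf.toList ++ applyC pre y := by
      rw [← hy]
      exact applyC_append pre hmempre suf.toList y htail
        (fun p hp => by rw [hy]; exact hnone p hp)
    rw [h1]
    -- the suf pass replaces the leading token by the sentinel
    have h2 : replOne suf.toList (Char.ofNat (sentBase + code)) (suf.toList ++ applyC pre y)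
        = Char.ofNat (sentBase + code) :: replOne suf.toList (Char.ofNat (sentBase + code)) (applyC pre y) := by
      obtain ⟨o0, o, ho⟩ : ∃ o0 o, suf.toList = o0 :: o := by
        cases hO : suf.toList with
        | nil => exact absurd hO hne
        | cons a b => exact ⟨a, b, rfl⟩
      rw [ho]
      have : (o0 :: o) ++ applyC pre y = o0 :: (o ++ applyC pre y) := by simp
      rw [this, replOne, if_pos (by rw [List.isPrefixOf_iff_prefix]; exact ⟨applyC pre y, by simp⟩)]
      congr 1
      rw [← this]
      simp
    rw [h2]
    -- post passes pass over the sentinel head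
    have hsent := sent_toNat (suf, code) (by rw [hsplit]; simp)
    have h3 : applyC post (Char.ofNat (sentBase + code)
          :: replOne suf.toList (Char.ofNat (sentBase + code)) (applyC pre y))
        = Char.ofNat (sentBase + code)
          :: applyC post (replOne suf.toList (Char.ofNat (sentBase + code)) (applyC pre y)) := by
      have := applyC_append post hmempost [Char.ofNat (sentBase + code)]
        (replOne suf.toList (Char.ofNat (sentBase + code)) (applyC pre y))
        (by simp)
        (fun p hp hc => by
          obtain ⟨hqne, hqhead, hqascii, _⟩ := goodPat_all p (hmempost p hp)
          obtain ⟨q0, q, hq⟩ : ∃ q0 q, p.1.toList = q0 :: q := by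
            cases hQ : p.1.toList with
            | nil => exact absurd hQ hqne
            | cons a b => exact ⟨a, b, rfl⟩
          rw [hq] at hc
          rw [List.singleton_append, List.cons_prefix_cons] at hc
          have hq0 : q0 = '.' := by rw [hq] at hqhead; simpa using hqhead
          have : ('.' : Char).toNat = sentBase + code := by
            rw [← hq0, hc.1, hsent.1]
          simp [sentBase] at this
          omega)
      simpa using this
    rw [h3]
    congr 1
    -- tail: all passes on y equal chtok of the drop
    rw [hdrop] at ih
    rw [← ih, hfold]
  | case3 c rest h ih =>
    rw [chtok, h]
    have hnone := findSuffixA_none _ _ h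
    rw [sortedSuffixesA_eq] at hnone
    have := applyC_append suffixPassesB (fun p hp => hp) [c] rest (by simp)
      (fun p hp => hnone p hp)
    simp only [List.singleton_append] at this
    rw [this, ih]

-- the port's fold equals the replOne fold
theorem runPassesB_eq (l : List Char) : runPassesB l = applyC suffixPassesB l := by
  have : ∀ ps : List (String × Nat), (∀ p ∈ ps, p ∈ suffixPassesB) → ∀ z,
      ps.foldl (fun b p => PySem.Chars.replace b p.1.toList [Char.ofNat (sentBase + p.2)]) z
        = applyC ps z := by
    intro ps
    induction ps with
    | nil => intro _ z; rfl
    | cons p rest ih =>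
      intro hg z
      have hne : p.1.toList ≠ [] := (goodPat_all p (hg p (by simp))).1
      show _ = applyC rest (replOne p.1.toList _ z)
      rw [List.foldl_cons, replace_eq_replOne z p.1.toList _ hne]
      exact ih (fun q hq => hg q (by simp [hq])) _
  exact this suffixPassesB (fun p hp => hp) l

-- decoding the tokenised characters gives exactly A's hex output (body chars are ASCII)
theorem map_decode_chtok (l : List Char) (hd : l.all pvDomChar = true) :
    (chtok l).map decodeCharB = encodeBodyA l := by
  induction l using chtok.induct with
  | case1 => rw [chtok, encodeBodyA]; rfl
  | case2 c rest suf code h ih =>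
    rw [chtok, encodeBodyA, h]
    have hm : (suf, code) ∈ suffixPassesB := by
      have := findSuffixA_mem _ _ _ h
      rwa [sortedSuffixesA_eq] at this
    have hsent := sent_toNat (suf, code) hm
    rw [List.map_cons]
    congr 1
    · rw [decodeCharB, if_pos (by rw [hsent.1]; simp [sentBase]), hsent.1]
      simp
    · apply ih
      rw [List.all_eq_true] at hd ⊢
      exact fun x hx => hd x (List.mem_of_mem_drop hx)
  | case3 c rest h ih =>
    rw [chtok, encodeBodyA, h, List.map_cons]
    rw [List.all_cons, Bool.and_eq_true] at hd
    congr 1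
    · rw [decodeCharB, if_neg (by
        have hdc := hd.1
        rw [pvDomChar] at hdc
        simp only [Bool.or_eq_true, Bool.and_eq_true, decide_eq_true_eq, beq_iff_eq] at hdc
        intro hc
        simp only [sentBase] at hc
        omega)]
    · exact ih hd.2

-- the body after B's scheme strip is still in the domain
theorem scheme_body_dom (url : String) (hd : pvDomStr url = true) :
    (firstSchemeB url schemePrefixesB).2.all pvDomChar = true := by
  rw [pvDomStr] at hd
  have : ∀ ps : List (String × Nat), (firstSchemeB url ps).2.all pvDomChar = true := by
    intro ps
    induction ps with
    | nil => exact hd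
    | cons p rest ih =>
      rw [firstSchemeB]
      split
      · rw [List.all_eq_true] at hd ⊢
        exact fun x hx => hd x (List.mem_of_mem_drop hx)
      · exact ih
  exact this schemePrefixesB

-- ===== VERDICT (by name: the statement is the Claim_ definition above) =====
theorem encode_eddystone_url_py_spec : Claim_equal_encode_eddystone_url_py := by
  intro url hdom
  unfold Spec_encode_eddystone_url_py
  show (pvHex2 (schemeLoopA url sortedSchemesA).1, encodeBodyA (schemeLoopA url sortedSchemesA).2)
      = (pvHex2 (firstSchemeB url schemePrefixesB).1,
         ((runPassesB (firstSchemeB url schemePrefixesB).2).map decodeCharB))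
  rw [scheme_eq, sortedSchemesA_eq]
  have hb := scheme_body_dom url hdom
  rw [runPassesB_eq, applyC_eq_chtok, map_decode_chtok _ hb]
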